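-- pv_equiv track=rewrite | github.com/jdidion/genomics_scripts | bin/seq/sort.py | compare_seq_names
-- ===== SOURCE A (Python) =====
-- chr_map = dict(X=23, Y=24, M=25, Un=26)
--
-- def compare_seq_names(a, b):
--     def cmp(x, y):
--         if x < y:
--             return -1
--         elif x == y:
--             return 0
--         else:
--             return 1
--
--     if a == b:
--         return 0
--
--     # strip off chr prefix
--     if a.startswith("chr"):
--         a = a[3:]
--     if b.startswith("chr"):
--         b = b[3:]
--
--     # map sex chromosome names to numbers (human genome specific!)
--     a = chr_map.get(a, a)
--     b = chr_map.get(b, b)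
--     a_int = b_int = False
--
--     # try to convert to integers
--     try:
--         a = int(a)
--         a_int = True
--     except:
--         pass
--
--     try:
--         b = int(b)
--         b_int = True
--     except:
--         pass
--
--     # natural sorting of numbers, with numbered chromosomes
--     # always coming before contigs, etc.
--     if a_int and b_int:
--         return cmp(a, b)
--     elif a_int:
--         return -1
--     elif b_int:
--         return 1
--     else:
--         # if these are contigs that have been localized to a chromosome,
--         # sort by the chromosome
--         ai = a.find("_")
--         bi = b.find("_")
--         if ai >= 0 and bi >= 0:
--             a_chr = a[0:ai]
--             b_chr = b[0:bi]
--             c = compare_seq_names(a_chr, b_chr)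
--             if c != 0:
--                 return c
--         elif ai >= 0:
--             return -1
--         elif bi >= 0:
--             return 1
--
--     # default to string sorting
--     return cmp(a, b)
-- ===== SOURCE B (Python) =====
-- chr_map = dict(X=23, Y=24, M=25, Un=26)
--
-- def _key(name):
--     # mirror per-name processing: strip 'chr', map sex chromosomes, try int
--     if name.startswith("chr"):
--         name = name[3:]
--     if name in chr_map:
--         return (0, chr_map[name])
--     try:
--         return (0, int(name))
--     except ValueError:
--         pass
--     i = name.find("_")
--     if i >= 0:
--         return (1, 0, _key(name[:i]), name)
--     return (1, 1, name)
--
-- def compare_seq_names(a, b):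
--     ka = _key(a)
--     kb = _key(b)
--     if ka < kb:
--         return -1
--     elif ka == kb:
--         return 0
--     else:
--         return 1
-- ===== Notes on version B (the rewrite author's own statement) =====
-- stated objective: alternative
-- what changed: B replaces A's branch-heavy pairwise comparison by computing a recursive sort key (numeric / contig-with-prefix-key / plain, after the same chr-strip, sex-chromosome map and int() attempt) for each name and comparing the two keys lexicographically as tuples.
import Mathlib
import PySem

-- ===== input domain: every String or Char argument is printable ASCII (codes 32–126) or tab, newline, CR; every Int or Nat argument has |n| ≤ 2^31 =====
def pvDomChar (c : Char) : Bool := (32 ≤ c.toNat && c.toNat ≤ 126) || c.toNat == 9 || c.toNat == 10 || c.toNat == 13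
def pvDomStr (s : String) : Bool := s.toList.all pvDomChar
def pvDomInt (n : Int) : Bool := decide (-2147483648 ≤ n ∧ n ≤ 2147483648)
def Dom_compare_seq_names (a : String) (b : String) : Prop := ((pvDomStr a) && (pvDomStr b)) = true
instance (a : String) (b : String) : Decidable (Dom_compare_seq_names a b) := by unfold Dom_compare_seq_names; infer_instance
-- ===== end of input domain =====

-- B re-implements the comparison as a recursive sort key compared lexicographically (different decomposition); return values proved identical.

-- module-level constant chr_map = dict(X=23, Y=24, M=25, Un=26), shared context of both sources
def pvChrMap : PySem.Dict (List Char) Int :=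
  PySem.Dict.ofList [("X".toList, 23), ("Y".toList, 24), ("M".toList, 25), ("Un".toList, 26)]

-- ===== PORT A =====
-- inner helper cmp(x, y) of A, at the two types it is used at
def pvCmpIntA (x y : Int) : Int := if x < y then -1 else if x = y then 0 else 1
def pvCmpStrA (x y : List Char) : Int := if x < y then -1 else if x = y then 0 else 1

-- self-contained lemma cited by the ports' decreasing_by: the prefix before the first '_' is shorter
theorem pvSliceFindLt (cs : List Char) (h : 0 ≤ PySem.Chars.find cs ['_']) :
    (PySem.List.slice cs (some 0) (some (PySem.Chars.find cs ['_']))).length < cs.length := by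
  have hspec := PySem.Chars.find_spec (s := cs) (sub := ['_']) h
  have hlt : (PySem.Chars.find cs ['_']).toNat < cs.length := by
    rcases hspec.1 with ⟨t, ht⟩
    by_contra hle
    have : cs.drop (PySem.Chars.find cs ['_']).toNat = [] := List.drop_eq_nil_iff.mpr (by omega)
    rw [this] at ht; simp at ht
  rw [PySem.List.slice_toNat cs le_rfl h]
  simp
  omega

theorem pvStripLenLe (cs : List Char) :
    (if PySem.Chars.startswith cs "chr".toList then PySem.List.slice cs (some 3) none else cs).length ≤ cs.length := by
  split
  · rw [show ((3 : Int)) = ((3 : Nat) : Int) by norm_num, PySem.List.slice_from_natCast]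
    simp
  · exact le_rfl

-- literal transliteration of A on the character-list side
def pvCmpACore (a b : List Char) : Int :=
  if a = b then 0
  else
    let a1 := if PySem.Chars.startswith a "chr".toList then PySem.List.slice a (some 3) none else a
    let b1 := if PySem.Chars.startswith b "chr".toList then PySem.List.slice b (some 3) none else b
    -- a = chr_map.get(a, a); try: a = int(a): afterwards a is an int exactly when this is `some`
    let aInt? : Option Int :=
      match pvChrMap.get? a1 with
      | some v => some v
      | none => PySem.Int.ofChars? a1
    let bInt? : Option Int :=
      match pvChrMap.get? b1 with
      | some v => some v
      | none => PySem.Int.ofChars? b1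
    match aInt?, bInt? with
    | some x, some y => pvCmpIntA x y
    | some _, none => -1
    | none, some _ => 1
    | none, none =>
      let ai := PySem.Chars.find a1 ['_']
      let bi := PySem.Chars.find b1 ['_']
      if 0 ≤ ai then
        if 0 ≤ bi then
          let c := pvCmpACore (PySem.List.slice a1 (some 0) (some ai)) (PySem.List.slice b1 (some 0) (some bi))
          if c ≠ 0 then c else pvCmpStrA a1 b1
        else -1
      else
        if 0 ≤ bi then 1
        else pvCmpStrA a1 b1
termination_by a.length + b.length
decreasing_by
  exact Nat.add_lt_add (lt_of_lt_of_le (pvSliceFindLt _ (by assumption)) (pvStripLenLe a))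
    (lt_of_lt_of_le (pvSliceFindLt _ (by assumption)) (pvStripLenLe b))

def compare_seq_names (a : String) (b : String) : Int := pvCmpACore a.toList b.toList

-- ===== PORT B =====
-- B's sort key: (0, n) for numeric chromosomes, (1, 0, key(prefix), name) for localized contigs, (1, 1, name) otherwise
inductive SeqKey where
  | num : Int → SeqKey
  | contig : SeqKey → List Char → SeqKey
  | plain : List Char → SeqKey
deriving DecidableEq, Repr

def pvSeqKey (name : List Char) : SeqKey :=
  let n := if PySem.Chars.startswith name "chr".toList then PySem.List.slice name (some 3) none else name
  match pvChrMap.get? n with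
  | some v => .num v
  | none =>
    match PySem.Int.ofChars? n with
    | some v => .num v
    | none =>
      if 0 ≤ PySem.Chars.find n ['_'] then
        .contig (pvSeqKey (PySem.List.slice n (some 0) (some (PySem.Chars.find n ['_'])))) n
      else .plain n
termination_by name.length
decreasing_by
  exact lt_of_lt_of_le (pvSliceFindLt _ (by assumption)) (pvStripLenLe name)

-- Python tuple comparison of two keys, as a three-way comparison (num < contig < plain)
def pvCmpKey : SeqKey → SeqKey → Int
  | .num x, .num y => if x < y then -1 else if x = y then 0 else 1
  | .num _, _ => -1
  | _, .num _ => 1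
  | .contig p s, .contig q t =>
      let c := pvCmpKey p q
      if c ≠ 0 then c else (if s < t then -1 else if s = t then 0 else 1)
  | .contig _ _, .plain _ => -1
  | .plain _, .contig _ _ => 1
  | .plain s, .plain t => if s < t then -1 else if s = t then 0 else 1

def compare_seq_names_alt (a : String) (b : String) : Int :=
  pvCmpKey (pvSeqKey a.toList) (pvSeqKey b.toList)

-- ===== PRECONDITION & SPEC =====
def Spec_compare_seq_names (a : String) (b : String) (out : Int) : Prop := out = compare_seq_names_alt a b
instance (a : String) (b : String) (out : Int) : Decidable (Spec_compare_seq_names a b out) := by unfold Spec_compare_seq_names; infer_instance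

-- ===== CLAIM (what is proved, stated in full; the proofs are below) =====
def Claim_equal_compare_seq_names : Prop := ∀ (a : String) (b : String), Dom_compare_seq_names a b → Spec_compare_seq_names a b (compare_seq_names a b)

-- ===== LEMMAS AND PROOFS =====
theorem pvCmpKey_self (k : SeqKey) : pvCmpKey k k = 0 := by
  induction k with
  | num x => simp [pvCmpKey]
  | contig p s ih => simp [pvCmpKey, ih]
  | plain s => simp [pvCmpKey]

-- proof-side abbreviations for the shared per-name processing
def pvStrip (cs : List Char) : List Char :=
  if PySem.Chars.startswith cs "chr".toList then PySem.List.slice cs (some 3) none else cs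

def pvParse (cs : List Char) : Option Int :=
  match pvChrMap.get? (pvStrip cs) with
  | some v => some v
  | none => PySem.Int.ofChars? (pvStrip cs)

theorem pvStripLe (cs : List Char) : (pvStrip cs).length ≤ cs.length := pvStripLenLe cs

theorem pvSeqKey_eq (name : List Char) : pvSeqKey name =
    match pvParse name with
    | some v => .num v
    | none =>
      if 0 ≤ PySem.Chars.find (pvStrip name) ['_'] then
        .contig (pvSeqKey (PySem.List.slice (pvStrip name) (some 0)
                  (some (PySem.Chars.find (pvStrip name) ['_'])))) (pvStrip name)
      else .plain (pvStrip name) := by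
  rw [pvSeqKey]
  simp only [pvParse, pvStrip]
  set sn := (if PySem.Chars.startswith name "chr".toList = true then PySem.List.slice name (some 3) none else name) with hsn
  cases hg : pvChrMap.get? sn
  · cases hi : PySem.Int.ofChars? sn <;> rfl
  · rfl

theorem pvCmpACore_eq (a b : List Char) (hab : ¬ a = b) : pvCmpACore a b =
    match pvParse a, pvParse b with
    | some x, some y => pvCmpIntA x y
    | some _, none => -1
    | none, some _ => 1
    | none, none =>
      if 0 ≤ PySem.Chars.find (pvStrip a) ['_'] then
        if 0 ≤ PySem.Chars.find (pvStrip b) ['_'] then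
          let c := pvCmpACore
            (PySem.List.slice (pvStrip a) (some 0) (some (PySem.Chars.find (pvStrip a) ['_'])))
            (PySem.List.slice (pvStrip b) (some 0) (some (PySem.Chars.find (pvStrip b) ['_'])))
          if c ≠ 0 then c else pvCmpStrA (pvStrip a) (pvStrip b)
        else -1
      else
        if 0 ≤ PySem.Chars.find (pvStrip b) ['_'] then 1
        else pvCmpStrA (pvStrip a) (pvStrip b) := by
  rw [pvCmpACore, if_neg hab]
  simp only [pvParse, pvStrip]

theorem pvCmpACore_eq_key (a b : List Char) :
    pvCmpACore a b = pvCmpKey (pvSeqKey a) (pvSeqKey b) := by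
  by_cases hab : a = b
  · subst hab
    rw [pvCmpKey_self, pvCmpACore]
    simp
  · rw [pvCmpACore_eq a b hab, pvSeqKey_eq a, pvSeqKey_eq b]
    cases hpa : pvParse a <;> cases hpb : pvParse b <;> simp only []
    · -- neither name parses as an integer
      by_cases hfa : 0 ≤ PySem.Chars.find (pvStrip a) ['_'] <;>
        by_cases hfb : 0 ≤ PySem.Chars.find (pvStrip b) ['_']
      · have IH := pvCmpACore_eq_key
          (PySem.List.slice (pvStrip a) (some 0) (some (PySem.Chars.find (pvStrip a) ['_'])))
          (PySem.List.slice (pvStrip b) (some 0) (some (PySem.Chars.find (pvStrip b) ['_'])))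
        simp only [if_pos hfa, if_pos hfb, pvCmpKey, IH, pvCmpStrA]
      · simp [hfa, hfb, pvCmpKey]
      · simp [hfa, hfb, pvCmpKey]
      · simp [hfa, hfb, pvCmpKey, pvCmpStrA]
    · by_cases hfa : 0 ≤ PySem.Chars.find (pvStrip a) ['_'] <;> simp [hfa, pvCmpKey]
    · by_cases hfb : 0 ≤ PySem.Chars.find (pvStrip b) ['_'] <;> simp [hfb, pvCmpKey]
    · simp [pvCmpKey, pvCmpIntA]
termination_by a.length + b.length
decreasing_by
  exact Nat.add_lt_add (lt_of_lt_of_le (pvSliceFindLt _ hfa) (pvStripLe a))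
    (lt_of_lt_of_le (pvSliceFindLt _ hfb) (pvStripLe b))

-- ===== VERDICT (by name: the statement is the Claim_ definition above) =====
theorem compare_seq_names_spec : Claim_equal_compare_seq_names := by
  intro a b _
  unfold Spec_compare_seq_names compare_seq_names compare_seq_names_alt
  exact pvCmpACore_eq_key a.toList b.toList
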